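-- pv_equiv track=rewrite | github.com/badr-elmazaz/Competitive-Programming-and-Interview-Preparation | Advent of Code/2022/Day 3/solver.py | get_common_char
-- ===== SOURCE A (Python) =====
-- def get_common_char(s1: str, s2: str)->str:
--     # sort them so it the search will be more efficient
--     s1_sorted=''.join(sorted(s1))
--     s2_sorted=''.join(sorted(s2))
--     for c1 in s1_sorted:
--         for c2 in s2_sorted:
--             if( c1==c2 ):
--                 return c1
--             if( c1<c2 ):
--                 break
-- ===== SOURCE B (Python) =====
-- def get_common_char(s1: str, s2: str) -> str:
--     # single two-pointer merge pass over the two sorted sequences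
--     a = sorted(s1)
--     b = sorted(s2)
--     i = j = 0
--     while i < len(a) and j < len(b):
--         if a[i] == b[j]:
--             return a[i]
--         if a[i] < b[j]:
--             i += 1
--         else:
--             j += 1
--     return None
-- ===== Notes on version B (the rewrite author's own statement) =====
-- stated objective: alternative
-- what changed: A's per-character rescan of sorted s2 (nested loop with break) is replaced by a single two-pointer merge pass over both sorted sequences.
import Mathlib
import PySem

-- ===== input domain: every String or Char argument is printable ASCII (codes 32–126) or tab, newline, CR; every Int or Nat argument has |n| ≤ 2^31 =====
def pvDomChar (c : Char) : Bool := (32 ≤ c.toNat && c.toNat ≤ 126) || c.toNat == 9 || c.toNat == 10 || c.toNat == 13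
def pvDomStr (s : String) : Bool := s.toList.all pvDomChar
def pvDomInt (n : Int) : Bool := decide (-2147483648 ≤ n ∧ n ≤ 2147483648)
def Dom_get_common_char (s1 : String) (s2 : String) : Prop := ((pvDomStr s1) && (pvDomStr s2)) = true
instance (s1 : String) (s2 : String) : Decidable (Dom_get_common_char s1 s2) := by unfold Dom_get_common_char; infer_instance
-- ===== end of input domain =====

-- B replaces A's nested rescan of sorted s2 by a single two-pointer merge over both sorted sequences (objective: alternative; sorting dominates on random inputs, so no measured speedup).


-- ===== PORT A =====
-- inner 'for c2 in s2_sorted' loop with its return / break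
def pvInnerA (c1 : Char) : List Char → Option String
  | [] => none
  | c2 :: rest =>
      if c1 = c2 then some (String.ofList [c1])
      else if c1 < c2 then none
      else pvInnerA c1 rest

-- outer 'for c1 in s1_sorted' loop
def pvOuterA (l2 : List Char) : List Char → Option String
  | [] => none
  | c1 :: rest =>
      match pvInnerA c1 l2 with
      | some s => some s
      | none => pvOuterA l2 rest

def get_common_char (s1 : String) (s2 : String) : Option String :=
  let s1_sorted := PySem.List.sorted s1.toList (fun c => c) false
  let s2_sorted := PySem.List.sorted s2.toList (fun c => c) false
  pvOuterA s2_sorted s1_sorted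

-- ===== PORT B =====
-- the while-loop with two advancing pointers, as structural recursion on the two lists
def pvMerge : List Char → List Char → Option String
  | [], _ => none
  | _ :: _, [] => none
  | a :: as, b :: bs =>
      if a = b then some (String.ofList [a])
      else if a < b then pvMerge as (b :: bs)
      else pvMerge (a :: as) bs

def get_common_char_alt (s1 : String) (s2 : String) : Option String :=
  pvMerge (PySem.List.sorted s1.toList (fun c => c) false)
          (PySem.List.sorted s2.toList (fun c => c) false)

-- ===== PRECONDITION & SPEC =====
def Spec_get_common_char (s1 : String) (s2 : String) (out : Option String) : Prop := out = get_common_char_alt s1 s2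
instance (s1 : String) (s2 : String) (out : Option String) : Decidable (Spec_get_common_char s1 s2 out) := by unfold Spec_get_common_char; infer_instance

-- ===== CLAIM (what is proved, stated in full; the proofs are below) =====
def Claim_equal_get_common_char : Prop := ∀ (s1 : String) (s2 : String), Dom_get_common_char s1 s2 → Spec_get_common_char s1 s2 (get_common_char s1 s2)

-- ===== LEMMAS AND PROOFS =====

-- both programs compute the first char of l1 that occurs in l2, wrapped as a one-char string
def pvFindCommon (l1 l2 : List Char) : Option String :=
  (l1.find? (fun c => decide (c ∈ l2))).map (fun c => String.ofList [c])

theorem find?_congr_mem {α : Type} (l : List α) (p q : α → Bool)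
    (h : ∀ x ∈ l, p x = q x) : l.find? p = l.find? q := by
  induction l with
  | nil => rfl
  | cons a t ih =>
      simp only [List.find?_cons, h a (by simp)]
      cases q a <;> simp [ih (fun x hx => h x (by simp [hx]))]

theorem innerA_eq (c1 : Char) (l2 : List Char) (h : l2.Pairwise (· ≤ ·)) :
    pvInnerA c1 l2 = if c1 ∈ l2 then some (String.ofList [c1]) else none := by
  induction l2 with
  | nil => simp [pvInnerA]
  | cons b bs ih =>
      rcases List.pairwise_cons.mp h with ⟨hb, hbs⟩
      by_cases he : c1 = b
      · simp [pvInnerA, he]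
      · by_cases hlt : c1 < b
        · have : c1 ∉ bs := fun hm => absurd (lt_of_lt_of_le hlt (hb _ hm)) (lt_irrefl c1)
          simp [pvInnerA, he, hlt, this]
        · simp [pvInnerA, he, hlt, ih hbs]

theorem outerA_eq (l1 l2 : List Char) (h2 : l2.Pairwise (· ≤ ·)) :
    pvOuterA l2 l1 = pvFindCommon l1 l2 := by
  induction l1 with
  | nil => rfl
  | cons a t ih =>
      simp only [pvOuterA, innerA_eq a l2 h2, pvFindCommon, List.find?_cons]
      by_cases hm : a ∈ l2
      · simp [hm]
      · simpa [hm, pvFindCommon] using ih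

theorem merge_eq (l1 : List Char) : ∀ (l2 : List Char), l1.Pairwise (· ≤ ·) → l2.Pairwise (· ≤ ·) →
    pvMerge l1 l2 = pvFindCommon l1 l2 := by
  induction l1 with
  | nil => intro l2 _ _; simp [pvMerge, pvFindCommon]
  | cons a as ih =>
      intro l2
      induction l2 with
      | nil =>
          intro _ _
          simp [pvMerge, pvFindCommon]
      | cons b bs ih2 =>
          intro h1 h2
          rcases List.pairwise_cons.mp h1 with ⟨ha, has⟩
          rcases List.pairwise_cons.mp h2 with ⟨hb, hbs⟩
          by_cases he : a = b
          · simp [pvMerge, he, pvFindCommon]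
          · by_cases hlt : a < b
            · have hnm : a ∉ b :: bs := by
                intro hm
                rcases List.mem_cons.mp hm with rfl | hm
                · exact he rfl
                · exact absurd (lt_of_lt_of_le hlt (hb _ hm)) (lt_irrefl a)
              simp only [pvMerge, if_neg he, if_pos hlt]
              rw [ih (b :: bs) has h2]
              have ha2 : a ∉ bs := fun h => hnm (List.mem_cons_of_mem _ h)
              simp [pvFindCommon, he, ha2]
            · -- b < a : drop b; no element of a :: as equals b
              have hba : b < a := lt_of_le_of_ne (not_lt.mp hlt) (fun h => he h.symm)
              simp only [pvMerge, if_neg he, if_neg hlt]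
              rw [ih2 h1 hbs]
              unfold pvFindCommon
              congr 1
              apply find?_congr_mem
              intro x hx
              have hbx : b < x := by
                rcases List.mem_cons.mp hx with rfl | hm
                · exact hba
                · exact lt_of_lt_of_le hba (ha _ hm)
              have hxb : x ≠ b := hbx.ne'
              simp [List.mem_cons, hxb]

-- ===== VERDICT (by name: the statement is the Claim_ definition above) =====
theorem get_common_char_spec : Claim_equal_get_common_char := by
  intro s1 s2 _
  unfold Spec_get_common_char get_common_char get_common_char_alt
  rw [outerA_eq _ _ (PySem.List.sorted_pairwise s2.toList (fun c => c)),
      merge_eq _ _ (PySem.List.sorted_pairwise s1.toList (fun c => c))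
                   (PySem.List.sorted_pairwise s2.toList (fun c => c))]
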